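-- pv_equiv track=rewrite | github.com/agent-persona/personas-pipeline | crawler/crawler/feature_crawler/platforms/linkedin/connector_browser.py | _split_section_blob
-- ===== SOURCE A (Python) =====
-- def _split_section_blob(blob: str) -> list[str]:
--     """Split a raw section text blob into individual items heuristically."""
--     lines = [line.strip() for line in blob.split("\n") if line.strip()]
--     if len(lines) <= 1:
--         return [blob.strip()] if blob.strip() else []
--     items: list[str] = []
--     current: list[str] = []
--     for line in lines:
--         if len(line.split()) >= 3 and current and (
--             line[0].isupper() or line.startswith("·")
--         ):
--             combined = " ".join(current)
--             if len(combined.split()) >= 4: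
--                 items.append(combined)
--             current = [line]
--         else:
--             current.append(line)
--     if current:
--         combined = " ".join(current)
--         if len(combined.split()) >= 4:
--             items.append(combined)
--     return items if items else ([blob.strip()] if len(blob.split()) >= 4 else [])
-- ===== SOURCE B (Python) =====
-- def _is_boundary(line: str) -> bool:
--     return len(line.split()) >= 3 and (line[0].isupper() or line.startswith("·"))
--
--
-- def _split_section_blob(blob: str) -> list[str]:
--     """Split a raw section text blob into individual items heuristically."""
--     lines = [line.strip() for line in blob.split("\n") if line.strip()]
--     if len(lines) <= 1:
--         return [blob.strip()] if blob.strip() else []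
--     items: list[str] = []
--     while lines:
--         k = 1
--         while k < len(lines) and not _is_boundary(lines[k]):
--             k += 1
--         chunk = " ".join(lines[:k])
--         if len(chunk.split()) >= 4:
--             items.append(chunk)
--         lines = lines[k:]
--     return items if items else ([blob.strip()] if len(blob.split()) >= 4 else [])
-- ===== Notes on version B (the rewrite author's own statement) =====
-- stated objective: alternative
-- what changed: A accumulates lines into a running buffer and flushes the buffer whenever a boundary line arrives (plus a trailing flush); B instead repeatedly scans ahead to the next boundary, slices that whole chunk off the line list at once, and emits it if it has >= 4 words, with no carried buffer or final flush.
import Mathlib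
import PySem

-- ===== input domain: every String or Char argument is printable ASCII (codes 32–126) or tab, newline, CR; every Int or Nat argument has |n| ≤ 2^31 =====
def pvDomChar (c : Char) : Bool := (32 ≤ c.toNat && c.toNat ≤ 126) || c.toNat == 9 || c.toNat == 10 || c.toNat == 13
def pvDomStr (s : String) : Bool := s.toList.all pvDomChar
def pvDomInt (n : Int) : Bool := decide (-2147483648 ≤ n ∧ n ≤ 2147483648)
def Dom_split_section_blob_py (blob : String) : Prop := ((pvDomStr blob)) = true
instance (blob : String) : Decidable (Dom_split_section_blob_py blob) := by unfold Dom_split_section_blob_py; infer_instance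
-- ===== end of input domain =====

-- B re-decomposes A's accumulate-and-flush loop as "repeatedly split off the next chunk"
-- (scan ahead to the next boundary line, slice that chunk off, emit it if it has ≥ 4 words);
-- objective: alternative decomposition, same cost.

-- ===== PORT A =====
-- line[0].isupper() on a 1-char slice of an ASCII line = Chars.isupper of that char (exact on Dom);
-- the comprehension keeps only nonempty stripped lines, so Python's line[0] never raises and pyGet? is never none.
def pvFirstUpper (line : String) : Bool :=
  (PySem.Str.pyGet? line 0).elim false PySem.Chars.isupper

-- the body of A's `for line in lines` loop, state = (items, current)
def pvStepA (st : List String × List String) (line : String) : List String × List String :=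
  if decide ((PySem.Str.split₀ line).length ≥ 3) && !st.2.isEmpty
      && (pvFirstUpper line || PySem.Str.startswith line "·") then
    let combined := PySem.Str.join " " st.2
    let items := if (PySem.Str.split₀ combined).length ≥ 4 then st.1 ++ [combined] else st.1
    (items, [line])
  else
    (st.1, st.2 ++ [line])

-- A's trailing `if current:` flush
def pvFlushA (st : List String × List String) : List String :=
  if st.2.isEmpty then st.1
  else
    let combined := PySem.Str.join " " st.2
    if (PySem.Str.split₀ combined).length ≥ 4 then st.1 ++ [combined] else st.1

def split_section_blob_py (blob : String) : List String :=
  let lines := (((PySem.Str.split? blob "\n").getD []).map PySem.Str.strip).filter (fun l => !(l == ""))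
  if lines.length ≤ 1 then
    if !(PySem.Str.strip blob == "") then [PySem.Str.strip blob] else []
  else
    let items := pvFlushA (lines.foldl pvStepA ([], []))
    if !items.isEmpty then items
    else if (PySem.Str.split₀ blob).length ≥ 4 then [PySem.Str.strip blob] else []

-- ===== PORT B =====
-- Source B's _is_boundary
def pvIsBoundary (line : String) : Bool :=
  decide ((PySem.Str.split₀ line).length ≥ 3)
    && (pvFirstUpper line || PySem.Str.startswith line "·")

-- Source B's inner `while k < len(lines) and not _is_boundary(lines[k])` scan, counted over lines[1:]
def pvScanLen : List String → Nat
  | [] => 0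
  | l :: rest => if pvIsBoundary l then 0 else pvScanLen rest + 1

-- Source B's outer `while lines:` loop: split the next chunk off, emit it if it has ≥ 4 words
def pvAltLoop (lines items : List String) : List String :=
  match lines with
  | [] => items
  | l :: rest =>
    let k := pvScanLen rest
    let chunk := PySem.Str.join " " (l :: rest.take k)
    let items' := if (PySem.Str.split₀ chunk).length ≥ 4 then items ++ [chunk] else items
    pvAltLoop (rest.drop k) items'
termination_by lines.length
decreasing_by simp [List.length_drop]

def split_section_blob_py_alt (blob : String) : List String :=
  let lines := (((PySem.Str.split? blob "\n").getD []).map PySem.Str.strip).filter (fun l => !(l == ""))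
  if lines.length ≤ 1 then
    if !(PySem.Str.strip blob == "") then [PySem.Str.strip blob] else []
  else
    let items := pvAltLoop lines []
    if !items.isEmpty then items
    else if (PySem.Str.split₀ blob).length ≥ 4 then [PySem.Str.strip blob] else []

-- ===== PRECONDITION & SPEC =====
def Spec_split_section_blob_py (blob : String) (out : List String) : Prop := out = split_section_blob_py_alt blob
instance (blob : String) (out : List String) : Decidable (Spec_split_section_blob_py blob out) := by unfold Spec_split_section_blob_py; infer_instance

-- ===== CLAIM (what is proved, stated in full; the proofs are below) =====
def Claim_equal_split_section_blob_py : Prop := ∀ (blob : String), Dom_split_section_blob_py blob → Spec_split_section_blob_py blob (split_section_blob_py blob)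

-- ===== LEMMAS AND PROOFS =====

-- proof helper: append a chunk to items if it has ≥ 4 words
def pvEmit (chunk : String) (items : List String) : List String :=
  if (PySem.Str.split₀ chunk).length ≥ 4 then items ++ [chunk] else items

lemma pvAltLoop_nil (items : List String) : pvAltLoop [] items = items := by
  rw [pvAltLoop.eq_def]

lemma pvAltLoop_cons (l : String) (rest items : List String) :
    pvAltLoop (l :: rest) items =
      pvAltLoop (rest.drop (pvScanLen rest))
        (pvEmit (PySem.Str.join " " (l :: rest.take (pvScanLen rest))) items) := by
  rw [pvAltLoop.eq_def]
  simp [pvEmit]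

-- proof helper: common structural form of both loops, with an explicit current chunk `cur`
def pvRun : List String → List String → List String → List String
  | cur, [], items => pvEmit (PySem.Str.join " " cur) items
  | cur, l :: rest, items =>
      if pvIsBoundary l then pvRun [l] rest (pvEmit (PySem.Str.join " " cur) items)
      else pvRun (cur ++ [l]) rest items

lemma pvStepA_boundary (st : List String × List String) (line : String)
    (hc : st.2 ≠ []) (hb : pvIsBoundary line = true) :
    pvStepA st line = (pvEmit (PySem.Str.join " " st.2) st.1, [line]) := by
  rw [pvIsBoundary, Bool.and_eq_true] at hb
  rw [pvStepA, if_pos]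
  · rfl
  · rw [Bool.and_eq_true, Bool.and_eq_true]
    exact ⟨⟨hb.1, by simp [hc]⟩, hb.2⟩

lemma pvStepA_not_boundary (st : List String × List String) (line : String)
    (hb : pvIsBoundary line = false) :
    pvStepA st line = (st.1, st.2 ++ [line]) := by
  rw [pvIsBoundary] at hb
  rw [pvStepA, if_neg]
  rcases Bool.and_eq_false_iff.mp hb with h | h <;>
    simp only [h, Bool.false_and, Bool.and_false, Bool.false_eq_true, not_false_eq_true]

-- A's loop-and-flush equals the common form
lemma foldA_eq_pvRun (ls : List String) : ∀ cur items, cur ≠ [] →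
    pvFlushA (ls.foldl pvStepA (items, cur)) = pvRun cur ls items := by
  induction ls with
  | nil =>
    intro cur items hcur
    simp [pvFlushA, pvRun, pvEmit, hcur]
  | cons l rest ih =>
    intro cur items hcur
    by_cases hb : pvIsBoundary l = true
    · rw [List.foldl_cons, pvStepA_boundary (items, cur) l hcur hb,
        ih [l] _ (by simp), pvRun, if_pos hb]
    · have hb' : pvIsBoundary l = false := by simpa using hb
      rw [List.foldl_cons, pvStepA_not_boundary (items, cur) l hb',
        ih (cur ++ [l]) items (by simp), pvRun, if_neg hb]

-- the common form equals B's chunk-at-a-time loop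
lemma pvRun_eq_altLoop (ls : List String) : ∀ cur items,
    pvRun cur ls items =
      pvAltLoop (ls.drop (pvScanLen ls))
        (pvEmit (PySem.Str.join " " (cur ++ ls.take (pvScanLen ls))) items) := by
  induction ls with
  | nil =>
    intro cur items
    simp [pvRun, pvScanLen, pvAltLoop_nil]
  | cons l rest ih =>
    intro cur items
    by_cases hb : pvIsBoundary l = true
    · rw [pvRun, if_pos hb]
      rw [ih [l] (pvEmit (PySem.Str.join " " cur) items)]
      rw [pvScanLen, if_pos hb]
      simp only [List.take_zero, List.drop_zero, List.append_nil]
      rw [pvAltLoop_cons]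
      simp
    · have hb' : pvIsBoundary l = false := by simpa using hb
      rw [pvRun, if_neg hb]
      rw [ih (cur ++ [l]) items]
      rw [pvScanLen, if_neg hb]
      simp [List.append_assoc]

lemma altLoop_cons_eq_pvRun (l : String) (rest items : List String) :
    pvAltLoop (l :: rest) items = pvRun [l] rest items := by
  rw [pvRun_eq_altLoop, pvAltLoop_cons]
  simp

lemma loopA_eq_loopB (lines : List String) (h : lines ≠ []) :
    pvFlushA (lines.foldl pvStepA ([], [])) = pvAltLoop lines [] := by
  cases lines with
  | nil => exact absurd rfl h
  | cons l rest =>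
    have hfirst : pvStepA ([], []) l = ([], [l]) := by
      rw [pvStepA, if_neg] <;> simp
    rw [List.foldl_cons, hfirst, foldA_eq_pvRun rest [l] [] (by simp),
      altLoop_cons_eq_pvRun]

-- ===== VERDICT (by name: the statement is the Claim_ definition above) =====
theorem split_section_blob_py_spec : Claim_equal_split_section_blob_py := by
  intro blob _
  unfold Spec_split_section_blob_py split_section_blob_py split_section_blob_py_alt
  set lines := (((PySem.Str.split? blob "\n").getD []).map PySem.Str.strip).filter (fun l => !(l == "")) with hl
  by_cases hlen : lines.length ≤ 1
  · simp [hlen]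
  · have hne : lines ≠ [] := by
      intro h; rw [h] at hlen; simp at hlen
    simp only [hlen, if_false]
    rw [loopA_eq_loopB lines hne]
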